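-- pv_equiv track=rewrite | github.com/sudy-super/coencoder_utils | count_element.py | get_range_count
-- ===== SOURCE A (Python) =====
-- def get_range_count(lengths):
--     counter = {
--         "131073~": 0,
--         "65537~131072": 0,
--         "32769~65536": 0,
--         "16385~32768": 0,
--         "8193~16384": 0,
--         "4097~8192": 0,
--         "2049~4096": 0,
--         "1025~2048": 0,
--         "0~1024": 0
--     }
--
--     for length in lengths:
--         if length >= 131073:
--             counter["131073~"] += 1
--         elif length >= 65537:
--             counter["65537~131072"] += 1
--         elif length >= 32769:
--             counter["32769~65536"] += 1
--         elif length >= 16385: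
--             counter["16385~32768"] += 1
--         elif length >= 8193:
--             counter["8193~16384"] += 1
--         elif length >= 4097:
--             counter["4097~8192"] += 1
--         elif length >= 2049:
--             counter["2049~4096"] += 1
--         elif length >= 1025:
--             counter["1025~2048"] += 1
--         else:
--             counter["0~1024"] += 1
--
--     return counter
-- ===== SOURCE B (Python) =====
-- import bisect
--
-- BOUNDARIES = [1025, 2049, 4097, 8193, 16385, 32769, 65537, 131073]
-- KEYS = ["0~1024", "1025~2048", "2049~4096", "4097~8192", "8193~16384",
--         "16385~32768", "32769~65536", "65537~131072", "131073~"]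
--
--
-- def get_range_count(lengths):
--     counter = {k: 0 for k in reversed(KEYS)}
--     for length in lengths:
--         counter[KEYS[bisect.bisect_right(BOUNDARIES, length)]] += 1
--     return counter
-- ===== Notes on version B (the rewrite author's own statement) =====
-- stated objective: idiomatic
-- what changed: Replaces the nine-branch if/elif chain with a sorted boundary table: bisect_right finds the bucket index and a parallel ascending key list names the bucket to increment.
import Mathlib
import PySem

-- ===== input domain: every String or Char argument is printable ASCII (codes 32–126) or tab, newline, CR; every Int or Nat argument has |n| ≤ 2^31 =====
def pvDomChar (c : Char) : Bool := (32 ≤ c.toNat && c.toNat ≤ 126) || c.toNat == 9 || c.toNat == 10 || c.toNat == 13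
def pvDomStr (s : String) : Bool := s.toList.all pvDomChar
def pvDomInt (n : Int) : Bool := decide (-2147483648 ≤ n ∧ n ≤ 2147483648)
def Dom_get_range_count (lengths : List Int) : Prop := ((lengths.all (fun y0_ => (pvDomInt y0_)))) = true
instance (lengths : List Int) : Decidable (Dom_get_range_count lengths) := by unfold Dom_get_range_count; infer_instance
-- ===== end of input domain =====

-- B replaces A's nine-branch if/elif chain by a sorted boundary table consulted with a
-- binary search (bisect_right), incrementing the key picked from a parallel ascending key list.
-- ===== PORT A =====
def get_range_count (lengths : List Int) : List (String × Int) :=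
  let counter : PySem.Dict String Int := PySem.Dict.ofList
    [("131073~", 0), ("65537~131072", 0), ("32769~65536", 0), ("16385~32768", 0),
     ("8193~16384", 0), ("4097~8192", 0), ("2049~4096", 0), ("1025~2048", 0), ("0~1024", 0)]
  (lengths.foldl (fun d length =>
      if length ≥ 131073 then d.modify "131073~" 0 (· + 1)
      else if length ≥ 65537 then d.modify "65537~131072" 0 (· + 1)
      else if length ≥ 32769 then d.modify "32769~65536" 0 (· + 1)
      else if length ≥ 16385 then d.modify "16385~32768" 0 (· + 1)
      else if length ≥ 8193 then d.modify "8193~16384" 0 (· + 1)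
      else if length ≥ 4097 then d.modify "4097~8192" 0 (· + 1)
      else if length ≥ 2049 then d.modify "2049~4096" 0 (· + 1)
      else if length ≥ 1025 then d.modify "1025~2048" 0 (· + 1)
      else d.modify "0~1024" 0 (· + 1)) counter).items

-- ===== PORT B =====
def grcBoundaries : List Int := [1025, 2049, 4097, 8193, 16385, 32769, 65537, 131073]
def grcKeys : List String :=
  ["0~1024", "1025~2048", "2049~4096", "4097~8192", "8193~16384",
   "16385~32768", "32769~65536", "65537~131072", "131073~"]
-- bisect.bisect_right on a sorted list: the number of elements ≤ x (exact for the sorted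
-- grcBoundaries table Source B applies it to).
def grcBisectRight (xs : List Int) (x : Int) : Nat := xs.countP (fun b => b ≤ x)

def get_range_count_alt (lengths : List Int) : List (String × Int) :=
  let counter : PySem.Dict String Int :=
    PySem.Dict.ofList (grcKeys.reverse.map (fun k => (k, (0 : Int))))
  (lengths.foldl (fun d length =>
      d.modify (grcKeys.getD (grcBisectRight grcBoundaries length) "") 0 (· + 1)) counter).items

-- ===== PRECONDITION & SPEC =====
def Spec_get_range_count (lengths : List Int) (out : List (String × Int)) : Prop := out = get_range_count_alt lengths
instance (lengths : List Int) (out : List (String × Int)) : Decidable (Spec_get_range_count lengths out) := by unfold Spec_get_range_count; infer_instance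

-- ===== CLAIM (what is proved, stated in full; the proofs are below) =====
def Claim_equal_get_range_count : Prop := ∀ (lengths : List Int), Dom_get_range_count lengths → Spec_get_range_count lengths (get_range_count lengths)

-- ===== LEMMAS AND PROOFS =====
theorem grc_step_eq (d : PySem.Dict String Int) (l : Int) :
    (if l ≥ 131073 then d.modify "131073~" 0 (· + 1)
     else if l ≥ 65537 then d.modify "65537~131072" 0 (· + 1)
     else if l ≥ 32769 then d.modify "32769~65536" 0 (· + 1)
     else if l ≥ 16385 then d.modify "16385~32768" 0 (· + 1)
     else if l ≥ 8193 then d.modify "8193~16384" 0 (· + 1)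
     else if l ≥ 4097 then d.modify "4097~8192" 0 (· + 1)
     else if l ≥ 2049 then d.modify "2049~4096" 0 (· + 1)
     else if l ≥ 1025 then d.modify "1025~2048" 0 (· + 1)
     else d.modify "0~1024" 0 (· + 1)) =
    d.modify (grcKeys.getD (grcBisectRight grcBoundaries l) "") 0 (· + 1) := by
  have key : grcKeys.getD (grcBisectRight grcBoundaries l) "" =
      (if l ≥ 131073 then "131073~"
       else if l ≥ 65537 then "65537~131072"
       else if l ≥ 32769 then "32769~65536"
       else if l ≥ 16385 then "16385~32768"
       else if l ≥ 8193 then "8193~16384"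
       else if l ≥ 4097 then "4097~8192"
       else if l ≥ 2049 then "2049~4096"
       else if l ≥ 1025 then "1025~2048"
       else "0~1024") := by
    unfold grcBisectRight grcBoundaries
    split_ifs with h1 h2 h3 h4 h5 h6 h7 h8
    · simp only [List.countP_cons, List.countP_nil,
        show decide ((1025:Int) ≤ l) = true from decide_eq_true (by omega),
        show decide ((2049:Int) ≤ l) = true from decide_eq_true (by omega),
        show decide ((4097:Int) ≤ l) = true from decide_eq_true (by omega),
        show decide ((8193:Int) ≤ l) = true from decide_eq_true (by omega),
        show decide ((16385:Int) ≤ l) = true from decide_eq_true (by omega),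
        show decide ((32769:Int) ≤ l) = true from decide_eq_true (by omega),
        show decide ((65537:Int) ≤ l) = true from decide_eq_true (by omega),
        show decide ((131073:Int) ≤ l) = true from decide_eq_true (by omega)]
      rfl
    · simp only [List.countP_cons, List.countP_nil,
        show decide ((1025:Int) ≤ l) = true from decide_eq_true (by omega),
        show decide ((2049:Int) ≤ l) = true from decide_eq_true (by omega),
        show decide ((4097:Int) ≤ l) = true from decide_eq_true (by omega),
        show decide ((8193:Int) ≤ l) = true from decide_eq_true (by omega),
        show decide ((16385:Int) ≤ l) = true from decide_eq_true (by omega),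
        show decide ((32769:Int) ≤ l) = true from decide_eq_true (by omega),
        show decide ((65537:Int) ≤ l) = true from decide_eq_true (by omega),
        show decide ((131073:Int) ≤ l) = false from decide_eq_false (by omega)]
      rfl
    · simp only [List.countP_cons, List.countP_nil,
        show decide ((1025:Int) ≤ l) = true from decide_eq_true (by omega),
        show decide ((2049:Int) ≤ l) = true from decide_eq_true (by omega),
        show decide ((4097:Int) ≤ l) = true from decide_eq_true (by omega),
        show decide ((8193:Int) ≤ l) = true from decide_eq_true (by omega),
        show decide ((16385:Int) ≤ l) = true from decide_eq_true (by omega),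
        show decide ((32769:Int) ≤ l) = true from decide_eq_true (by omega),
        show decide ((65537:Int) ≤ l) = false from decide_eq_false (by omega),
        show decide ((131073:Int) ≤ l) = false from decide_eq_false (by omega)]
      rfl
    · simp only [List.countP_cons, List.countP_nil,
        show decide ((1025:Int) ≤ l) = true from decide_eq_true (by omega),
        show decide ((2049:Int) ≤ l) = true from decide_eq_true (by omega),
        show decide ((4097:Int) ≤ l) = true from decide_eq_true (by omega),
        show decide ((8193:Int) ≤ l) = true from decide_eq_true (by omega),
        show decide ((16385:Int) ≤ l) = true from decide_eq_true (by omega),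
        show decide ((32769:Int) ≤ l) = false from decide_eq_false (by omega),
        show decide ((65537:Int) ≤ l) = false from decide_eq_false (by omega),
        show decide ((131073:Int) ≤ l) = false from decide_eq_false (by omega)]
      rfl
    · simp only [List.countP_cons, List.countP_nil,
        show decide ((1025:Int) ≤ l) = true from decide_eq_true (by omega),
        show decide ((2049:Int) ≤ l) = true from decide_eq_true (by omega),
        show decide ((4097:Int) ≤ l) = true from decide_eq_true (by omega),
        show decide ((8193:Int) ≤ l) = true from decide_eq_true (by omega),
        show decide ((16385:Int) ≤ l) = false from decide_eq_false (by omega),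
        show decide ((32769:Int) ≤ l) = false from decide_eq_false (by omega),
        show decide ((65537:Int) ≤ l) = false from decide_eq_false (by omega),
        show decide ((131073:Int) ≤ l) = false from decide_eq_false (by omega)]
      rfl
    · simp only [List.countP_cons, List.countP_nil,
        show decide ((1025:Int) ≤ l) = true from decide_eq_true (by omega),
        show decide ((2049:Int) ≤ l) = true from decide_eq_true (by omega),
        show decide ((4097:Int) ≤ l) = true from decide_eq_true (by omega),
        show decide ((8193:Int) ≤ l) = false from decide_eq_false (by omega),
        show decide ((16385:Int) ≤ l) = false from decide_eq_false (by omega),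
        show decide ((32769:Int) ≤ l) = false from decide_eq_false (by omega),
        show decide ((65537:Int) ≤ l) = false from decide_eq_false (by omega),
        show decide ((131073:Int) ≤ l) = false from decide_eq_false (by omega)]
      rfl
    · simp only [List.countP_cons, List.countP_nil,
        show decide ((1025:Int) ≤ l) = true from decide_eq_true (by omega),
        show decide ((2049:Int) ≤ l) = true from decide_eq_true (by omega),
        show decide ((4097:Int) ≤ l) = false from decide_eq_false (by omega),
        show decide ((8193:Int) ≤ l) = false from decide_eq_false (by omega),
        show decide ((16385:Int) ≤ l) = false from decide_eq_false (by omega),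
        show decide ((32769:Int) ≤ l) = false from decide_eq_false (by omega),
        show decide ((65537:Int) ≤ l) = false from decide_eq_false (by omega),
        show decide ((131073:Int) ≤ l) = false from decide_eq_false (by omega)]
      rfl
    · simp only [List.countP_cons, List.countP_nil,
        show decide ((1025:Int) ≤ l) = true from decide_eq_true (by omega),
        show decide ((2049:Int) ≤ l) = false from decide_eq_false (by omega),
        show decide ((4097:Int) ≤ l) = false from decide_eq_false (by omega),
        show decide ((8193:Int) ≤ l) = false from decide_eq_false (by omega),
        show decide ((16385:Int) ≤ l) = false from decide_eq_false (by omega),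
        show decide ((32769:Int) ≤ l) = false from decide_eq_false (by omega),
        show decide ((65537:Int) ≤ l) = false from decide_eq_false (by omega),
        show decide ((131073:Int) ≤ l) = false from decide_eq_false (by omega)]
      rfl
    · simp only [List.countP_cons, List.countP_nil,
        show decide ((1025:Int) ≤ l) = false from decide_eq_false (by omega),
        show decide ((2049:Int) ≤ l) = false from decide_eq_false (by omega),
        show decide ((4097:Int) ≤ l) = false from decide_eq_false (by omega),
        show decide ((8193:Int) ≤ l) = false from decide_eq_false (by omega),
        show decide ((16385:Int) ≤ l) = false from decide_eq_false (by omega),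
        show decide ((32769:Int) ≤ l) = false from decide_eq_false (by omega),
        show decide ((65537:Int) ≤ l) = false from decide_eq_false (by omega),
        show decide ((131073:Int) ≤ l) = false from decide_eq_false (by omega)]
      rfl
  rw [key]
  split_ifs <;> rfl

-- ===== VERDICT (by name: the statement is the Claim_ definition above) =====
theorem get_range_count_spec : Claim_equal_get_range_count := by
  intro lengths _
  unfold Spec_get_range_count get_range_count get_range_count_alt
  exact congrArg PySem.Dict.items
    (PySem.List.foldl_congr_mem lengths _ _ _ (fun d x _ => grc_step_eq d x))
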